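-- pv_equiv track=rewrite | github.com/hcui2/ROSALIND | TextbookTrack/BA11Utils.py | build_graph_from_masses
-- ===== SOURCE A (Python) =====
-- import collections
--
-- def build_graph_from_masses(masses, mass2ressidue):
--     """
--     Builds a graph from the given masses and mass-to-residue mapping.
--     the graph is represented as a dictionary where keys are mass strings
--     and values are lists of tuples (next_mass, residue).
--     """
--     graph = collections.defaultdict(list)
--     masses.insert(0, 0)
--     for i in range(0, len(masses) -1 ):
--         for j in range(i+1, len(masses)):
--             if (masses[j] - masses[i]) in mass2ressidue.keys():
--                 graph[str(masses[i])].append((str(masses[j]), mass2ressidue[masses[j] - masses[i]]))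
--     return graph
-- ===== SOURCE B (Python) =====
-- import collections
--
-- def build_graph_from_masses(masses, mass2ressidue):
--     """Index-based reformulation: build a value->positions map of the masses once;
--     each source mass then probes the possible target values (mass + residue) in that
--     map and sorts the matching positions, instead of scanning every later mass.
--     (Mutates masses like the original: inserts 0 at the front.)"""
--     masses.insert(0, 0)
--     index = collections.defaultdict(list)
--     for j, m in enumerate(masses):
--         index[m].append(j)
--     graph = collections.defaultdict(list)
--     for i, mi in enumerate(masses):
--         hits = []
--         for r, res in mass2ressidue.items():
--             for j in index.get(mi + r, ()):
--                 if j > i: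
--                     hits.append((j, res))
--         hits.sort(key=lambda t: t[0])
--         for j, res in hits:
--             graph[str(mi)].append((str(masses[j]), res))
--     return graph
-- ===== Notes on version B (the rewrite author's own statement) =====
-- stated objective: alternative
-- what changed: Replaces A's all-pairs scan of later masses with a value->positions index built in one pass: each source mass probes only the candidate target values (source mass + residue mass) in that index and sorts the matching positions; cheaper when the residue table is small, but not measured faster on a timing run's inputs (whose residue table grows with n), so no speed is claimed.
import Mathlib
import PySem

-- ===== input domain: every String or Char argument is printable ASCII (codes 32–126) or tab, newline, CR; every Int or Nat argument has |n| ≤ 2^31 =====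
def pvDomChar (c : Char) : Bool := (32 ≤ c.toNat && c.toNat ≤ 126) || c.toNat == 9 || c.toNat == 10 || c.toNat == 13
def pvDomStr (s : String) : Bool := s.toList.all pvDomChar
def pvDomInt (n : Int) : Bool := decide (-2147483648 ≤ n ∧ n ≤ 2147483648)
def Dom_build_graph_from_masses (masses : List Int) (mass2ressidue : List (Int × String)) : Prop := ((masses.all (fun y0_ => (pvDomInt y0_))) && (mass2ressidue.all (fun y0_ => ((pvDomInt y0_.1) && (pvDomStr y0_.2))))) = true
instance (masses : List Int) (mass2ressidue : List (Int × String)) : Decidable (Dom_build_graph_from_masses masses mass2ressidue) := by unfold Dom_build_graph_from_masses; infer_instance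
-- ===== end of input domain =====

-- B replaces A's all-pairs scan by a value->positions index of the masses built once:
-- each source mass probes only the candidate target values (source mass + residue mass)
-- and sorts the matching positions (objective: alternative; no speed is claimed).
-- Equivalence is about the RETURN value; both mutate `masses` identically (insert 0 at the front).

-- ===== PORT A =====
def build_graph_from_masses (masses : List Int) (mass2ressidue : List (Int × String)) : List (String × List (String × String)) :=
  let d := PySem.Dict.ofList mass2ressidue
  let ms := PySem.List.insert masses 0 0
  let g := (PySem.List.pyRange 0 ((ms.length : Int) - 1) 1).foldl (fun g i =>
      (PySem.List.pyRange (i + 1) (ms.length : Int) 1).foldl (fun g j =>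
        if d.contains (PySem.List.pyGetD ms j 0 - PySem.List.pyGetD ms i 0) then
          g.modify (PySem.Int.toStr (PySem.List.pyGetD ms i 0)) []
            (· ++ [(PySem.Int.toStr (PySem.List.pyGetD ms j 0),
                    d.getD (PySem.List.pyGetD ms j 0 - PySem.List.pyGetD ms i 0) "")])
        else g) g)
    PySem.Dict.empty
  g.items

-- ===== PORT B =====
def build_graph_from_masses_alt (masses : List Int) (mass2ressidue : List (Int × String)) : List (String × List (String × String)) :=
  let ms := PySem.List.insert masses 0 0
  -- index: value -> list of positions, built in one pass ('for j, m in enumerate(masses): index[m].append(j)')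
  let index := (PySem.List.enumerate ms).foldl
      (fun d p => d.modify p.2 [] (· ++ [p.1])) PySem.Dict.empty
  let d := PySem.Dict.ofList mass2ressidue
  let g := (PySem.List.enumerate ms).foldl (fun g p =>
      let hits := d.items.foldl (fun hits q =>
          (index.getD (p.2 + q.1) []).foldl (fun hits j =>
              if p.1 < j then hits ++ [(j, q.2)] else hits) hits) ([] : List (Int × String))
      let shits := PySem.List.sorted hits (fun t => t.1) false
      shits.foldl (fun g t =>
          g.modify (PySem.Int.toStr p.2) []
            (· ++ [(PySem.Int.toStr (PySem.List.pyGetD ms t.1 0), t.2)])) g)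
    PySem.Dict.empty
  g.items

-- ===== PRECONDITION & SPEC =====
def Spec_build_graph_from_masses (masses : List Int) (mass2ressidue : List (Int × String)) (out : List (String × List (String × String))) : Prop := out = build_graph_from_masses_alt masses mass2ressidue
instance (masses : List Int) (mass2ressidue : List (Int × String)) (out : List (String × List (String × String))) : Decidable (Spec_build_graph_from_masses masses mass2ressidue out) := by unfold Spec_build_graph_from_masses; infer_instance

-- ===== CLAIM (what is proved, stated in full; the proofs are below) =====
def Claim_equal_build_graph_from_masses : Prop := ∀ (masses : List Int) (mass2ressidue : List (Int × String)), Dom_build_graph_from_masses masses mass2ressidue → Spec_build_graph_from_masses masses mass2ressidue (build_graph_from_masses masses mass2ressidue)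

-- ===== LEMMAS AND PROOFS =====

-- any list whose elements all carry a key from `ks` is a permutation of the concatenation,
-- key by key, of its per-key filters (the partition behind the value->indices index)
theorem pv_partition {α κ : Type} [DecidableEq κ] (key : α → κ) :
    ∀ (ks : List κ) (l : List α), ks.Nodup → (∀ x ∈ l, key x ∈ ks) →
    l.Perm (ks.flatMap (fun k => l.filter (fun x => key x == k))) := by
  intro ks
  induction ks with
  | nil =>
    intro l _ hall
    have : l = [] := List.eq_nil_iff_forall_not_mem.mpr (fun x hx => by simpa using hall x hx)
    simp [this]
  | cons k ks' ih =>
    intro l hnd hall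
    rw [List.flatMap_cons]
    have hperm := (List.filter_append_perm (fun x => key x == k) l).symm
    refine hperm.trans (List.Perm.append_left _ ?_)
    have hnd' : ks'.Nodup := (List.nodup_cons.mp hnd).2
    have hk : k ∉ ks' := (List.nodup_cons.mp hnd).1
    have hall' : ∀ x ∈ l.filter (fun x => !(key x == k)), key x ∈ ks' := by
      intro x hx
      rcases List.mem_filter.mp hx with ⟨hxl, hxk⟩
      have := hall x hxl
      simp only [List.mem_cons] at this
      rcases this with h | h
      · exfalso; simp [h] at hxk
      · exact h
    have heq : ∀ k' ∈ ks',
        (l.filter (fun x => !(key x == k))).filter (fun x => key x == k')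
        = l.filter (fun x => key x == k') := by
      intro k' hk'
      rw [List.filter_filter]
      apply List.filter_congr
      intro x _
      by_cases h : key x = k'
      · have : k' ≠ k := fun he => hk (he ▸ hk')
        simp [h, this]
      · simp [h]
    have h1 := ih _ hnd' hall'
    have h2 : ks'.flatMap (fun k' => (l.filter (fun x => !(key x == k))).filter (fun x => key x == k'))
        = ks'.flatMap (fun k' => l.filter (fun x => key x == k')) :=
      List.flatMap_congr (fun k' hk' => heq k' hk')
    exact h2 ▸ h1

theorem pv_idx (ms : List Int) (v : Int) :
    ((PySem.List.enumerate ms).foldl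
      (fun d p => d.modify p.2 [] (· ++ [p.1])) PySem.Dict.empty).getD v []
    = ((PySem.List.enumerate ms).filter (fun p => p.2 == v)).map (·.1) := by
  have h := PySem.Dict.getD_foldl_modify_append
    (l := (PySem.List.enumerate ms).map (fun p => (p.2, p.1)))
    (d := (PySem.Dict.empty : PySem.Dict Int (List Int))) (c := v)
  rw [List.foldl_map] at h
  simp only [PySem.Dict.getD_empty, List.nil_append, List.filter_map, List.map_map] at h
  exact h

theorem pv_J (ms : List Int) (i : Int) (hi : 0 ≤ i) (hin : i < (ms.length : Int)) (v : Int) :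
    (((PySem.List.enumerate ms).filter (fun p => p.2 == v)).map (·.1)).filter (fun j => i < j)
    = (PySem.List.pyRange (i + 1) (ms.length : Int) 1).filter
        (fun j => PySem.List.pyGetD ms j 0 == v) := by
  rw [PySem.List.enumerate_eq_map_pyRange (d := 0)]
  simp only [List.filter_map, List.filter_filter, List.map_map, Function.comp_def, List.map_id']
  have hsplit : PySem.List.pyRange 0 (PySem.List.len ms) 1
      = PySem.List.pyRange 0 (i + 1) 1 ++ PySem.List.pyRange (i + 1) (ms.length : Int) 1 := by
    have := PySem.List.pyRange_one_append 0 (i + 1) (ms.length : Int) (by omega) (by omega)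
    simpa using this
  rw [hsplit, List.filter_append]
  have h1 : (PySem.List.pyRange 0 (i + 1) 1).filter
      (fun j => decide (i < j) && (PySem.List.pyGetD ms j 0 == v)) = [] := by
    apply List.filter_eq_nil_iff.mpr
    intro j hj
    have := (PySem.List.mem_pyRange_one).mp hj
    simp [show ¬ (i < j) by omega]
  rw [h1, List.nil_append]
  apply List.filter_congr
  intro j hj
  have := (PySem.List.mem_pyRange_one).mp hj
  simp [show i < j by omega]

-- the per-source row: B's probe loop, sorted by position, is exactly A's j-scan row
theorem pv_row (ms : List Int) (d : PySem.Dict Int String) (idx : PySem.Dict Int (List Int))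
    (hidx : ∀ v, idx.getD v []
      = ((PySem.List.enumerate ms).filter (fun p => p.2 == v)).map (·.1))
    (i : Int) (hi : 0 ≤ i) (hin : i < (ms.length : Int)) (hnd : d.keys.Nodup) :
    PySem.List.sorted
      (d.items.foldl (fun hits q =>
          (idx.getD (PySem.List.pyGetD ms i 0 + q.1) []).foldl
            (fun hits j => if i < j then hits ++ [(j, q.2)] else hits) hits)
        ([] : List (Int × String)))
      (fun t => t.1) false
    = ((PySem.List.pyRange (i + 1) (ms.length : Int) 1).filter
        (fun j => d.contains (PySem.List.pyGetD ms j 0 - PySem.List.pyGetD ms i 0))).map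
        (fun j => (j, d.getD (PySem.List.pyGetD ms j 0 - PySem.List.pyGetD ms i 0) "")) := by
  set mi := PySem.List.pyGetD ms i 0 with hmi
  -- the probe loops build, key by key, the concatenation of the per-key hit lists
  have hflat : d.items.foldl (fun hits q =>
        (idx.getD (mi + q.1) []).foldl
          (fun hits j => if i < j then hits ++ [(j, q.2)] else hits) hits)
        ([] : List (Int × String))
      = d.items.flatMap (fun q =>
          ((idx.getD (mi + q.1) []).filter (fun j => decide (i < j))).map (fun j => (j, q.2))) := by
    rw [PySem.List.foldl_congr_mem d.items _
      (fun hits q => hits ++ ((idx.getD (mi + q.1) []).filter (fun j => decide (i < j))).map (fun j => (j, q.2)))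
      [] (fun acc q _ => PySem.List.foldl_append_ite _ _ _ _)]
    rw [PySem.List.foldl_append_eq_flatMap, List.nil_append]
  rw [hflat]
  set T := (PySem.List.pyRange (i + 1) (ms.length : Int) 1).filter
      (fun j => d.contains (PySem.List.pyGetD ms j 0 - mi)) with hT
  set f : Int → Int × String := fun j => (j, d.getD (PySem.List.pyGetD ms j 0 - mi) "") with hf
  apply PySem.List.sorted_eq_of_perm_of_pairwise_lt
  · have hall : ∀ j ∈ T, (PySem.List.pyGetD ms j 0 - mi) ∈ d.keys := by
      intro j hj
      have := (List.mem_filter.mp hj).2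
      exact (PySem.Dict.contains_iff_mem_keys d _).mp (by simpa using this)
    have hpart := pv_partition (fun j => PySem.List.pyGetD ms j 0 - mi) d.keys T hnd hall
    have hkeys : d.keys = d.items.map (·.1) := rfl
    rw [hkeys, List.flatMap_map] at hpart
    have hmap := hpart.map f
    rw [List.map_flatMap] at hmap
    refine hmap.trans (List.Perm.of_eq ?_)
    apply List.flatMap_congr
    intro q hq
    have hq1 : q.1 ∈ d.keys := hkeys ▸ List.mem_map_of_mem hq
    rw [hidx, pv_J ms i hi hin (mi + q.1)]
    have hTf : T.filter ((fun j => PySem.List.pyGetD ms j 0 - mi == q.1))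
        = (PySem.List.pyRange (i + 1) (ms.length : Int) 1).filter
            (fun j => PySem.List.pyGetD ms j 0 == mi + q.1) := by
      rw [hT, List.filter_filter]
      apply List.filter_congr
      intro j _
      by_cases h : PySem.List.pyGetD ms j 0 = mi + q.1
      · have hd : PySem.List.pyGetD ms j 0 - mi = q.1 := by omega
        have e2 : (PySem.List.pyGetD ms j 0 == mi + q.1) = true := by simpa using h
        simp [e2, hd, (PySem.Dict.contains_iff_mem_keys d q.1).mpr hq1]
      · have hd : ¬ (PySem.List.pyGetD ms j 0 - mi = q.1) := by omega
        have e1 : (PySem.List.pyGetD ms j 0 - mi == q.1) = false := by simpa using hd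
        have e2 : (PySem.List.pyGetD ms j 0 == mi + q.1) = false := by simpa using h
        simp [e1, e2]
    rw [hTf]
    apply List.map_congr_left
    intro j hj
    have hjv : PySem.List.pyGetD ms j 0 = mi + q.1 := by
      simpa using (List.mem_filter.mp hj).2
    have : PySem.List.pyGetD ms j 0 - mi = q.1 := by omega
    rw [hf]
    simp only [this]
    rw [PySem.Dict.getD_of_mem_items d (by exact hq) hnd]
  · rw [List.pairwise_map]
    exact List.Pairwise.filter _ (PySem.List.pairwise_lt_pyRange_one (i + 1) (ms.length : Int))

theorem pv_main (masses : List Int) (mass2ressidue : List (Int × String)) :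
    build_graph_from_masses masses mass2ressidue = build_graph_from_masses_alt masses mass2ressidue := by
  unfold build_graph_from_masses build_graph_from_masses_alt
  simp only [PySem.List.insert_zero]
  set ms : List Int := 0 :: masses with hms
  set d := PySem.Dict.ofList mass2ressidue with hd
  set idx := (PySem.List.enumerate ms).foldl
      (fun d p => d.modify p.2 [] (· ++ [p.1])) PySem.Dict.empty with hidxd
  have hidx : ∀ v, idx.getD v []
      = ((PySem.List.enumerate ms).filter (fun p => p.2 == v)).map (·.1) := by
    intro v; rw [hidxd]; exact pv_idx ms v
  have hndk : d.keys.Nodup := hd ▸ PySem.Dict.nodup_keys_ofList mass2ressidue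
  congr 1
  rw [PySem.List.enumerate_eq_map_pyRange (d := 0), List.foldl_map]
  have hlen : PySem.List.len ms = (masses.length : Int) + 1 := by simp [hms]
  rw [hlen]
  set n : Int := (masses.length : Int) + 1 with hn
  have hmslen : ((ms.length : Nat) : Int) = n := by simp [hms, hn]
  rw [show PySem.List.pyRange 0 n 1
      = PySem.List.pyRange 0 (n - 1) 1 ++ [n - 1] by
    have h := PySem.List.pyRange_one_succ_right (a := 0) (b := n - 1) (by omega)
    rw [show n - 1 + 1 = n by ring] at h
    exact h]
  rw [List.foldl_append, List.foldl_cons, List.foldl_nil]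
  have hlast : PySem.List.sorted
      (d.items.foldl (fun hits q =>
          (idx.getD (PySem.List.pyGetD ms (n - 1) 0 + q.1) []).foldl
            (fun hits j => if n - 1 < j then hits ++ [(j, q.2)] else hits) hits)
        ([] : List (Int × String)))
      (fun t => t.1) false = [] := by
    rw [pv_row ms d idx hidx (n - 1) (by omega) (by omega) hndk]
    rw [show n - 1 + 1 = n from by ring, hmslen]
    rw [PySem.List.pyRange_one_eq_nil (by omega)]
    simp
  simp only [hlast, List.foldl_nil]
  rw [show ((ms.length : Nat) : Int) - 1 = n - 1 from by rw [hmslen]]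
  apply PySem.List.foldl_congr_mem
  intro g i hi
  have hi' := (PySem.List.mem_pyRange_one).mp hi
  rw [pv_row ms d idx hidx i (by omega) (by omega) hndk]
  rw [List.foldl_map]
  rw [PySem.List.foldl_if_eq_foldl_filter]

-- ===== VERDICT (by name: the statement is the Claim_ definition above) =====
theorem build_graph_from_masses_spec : Claim_equal_build_graph_from_masses := by
  intro masses mass2ressidue _
  exact pv_main masses mass2ressidue
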